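-- pv_equiv track=rewrite | github.com/browserstack/enigma-access-modules | aws_access/access.py | combine_labels_meta
-- ===== SOURCE A (Python) =====
-- def combine_labels_meta(access_labels):
--     """Combines the metadata for multiple access labels.
--
--     Args:
--         access_labels (str): Array of access labels.
--
--     Returns:
--         dict: Dictionary of access label keys and values.
--     """
--     if access_labels:
--         combined_meta = {"action": "", "account": "", "group": ""}
--         for label in access_labels:
--             for key, value in label.items():
--                 if str(combined_meta[key]) != "":
--                     combined_meta[key] = ", ".join(
--                         [str(combined_meta[key]), str(value)]
--                     )
--                 else:
--                     combined_meta[key] = str(value)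
--         return combined_meta
--     return {}
-- ===== SOURCE B (Python) =====
-- def combine_labels_meta(access_labels):
--     """Combines the metadata for multiple access labels.
--
--     Collects every key's values in one pass, then builds each combined
--     string with the usual incremental comma-join fold.
--     """
--     if not access_labels:
--         return {}
--     values = {"action": [], "account": [], "group": []}
--     for label in access_labels:
--         for key, value in label.items():
--             values[key].append(str(value))
--     result = {}
--     for key, vals in values.items():
--         combined = ""
--         for v in vals:
--             combined = f"{combined}, {v}" if combined else v
--         result[key] = combined
--     return result
-- ===== Notes on version B (the rewrite author's own statement) =====
-- stated objective: alternative
-- what changed: B separates collection from combination: one pass gathers each key's values into lists, then a per-key incremental comma-join fold builds each string, instead of A's interleaved dict-of-strings updates that re-join the growing string inside the label loop.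
import Mathlib
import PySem

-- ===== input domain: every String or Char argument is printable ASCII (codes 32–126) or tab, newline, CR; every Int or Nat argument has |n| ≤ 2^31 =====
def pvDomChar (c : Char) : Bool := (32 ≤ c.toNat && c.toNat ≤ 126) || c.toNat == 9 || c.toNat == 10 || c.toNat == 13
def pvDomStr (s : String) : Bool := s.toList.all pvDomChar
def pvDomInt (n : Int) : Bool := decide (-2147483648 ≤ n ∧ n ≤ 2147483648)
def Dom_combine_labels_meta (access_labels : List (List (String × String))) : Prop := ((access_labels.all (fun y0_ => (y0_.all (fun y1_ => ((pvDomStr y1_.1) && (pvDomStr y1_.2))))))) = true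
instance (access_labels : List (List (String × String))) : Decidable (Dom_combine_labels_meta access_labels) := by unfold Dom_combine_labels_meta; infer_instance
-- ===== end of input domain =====

-- B collects each key's values into lists in one pass and then builds each combined string with
-- an incremental comma-join fold per key, instead of A's interleaved dict-of-strings updates;
-- return value only (neither program mutates its argument).

-- ===== PORT A =====
def combine_labels_meta (access_labels : List (List (String × String))) : List (String × String) :=
  if access_labels = [] then []  -- 'if access_labels:' is False exactly on the empty list; 'return {}'
  else
    -- combined_meta = {"action": "", "account": "", "group": ""}
    let init : PySem.Dict String String :=
      ((PySem.Dict.empty.insert "action" "").insert "account" "").insert "group" ""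
    let final : PySem.Dict String String :=
      access_labels.foldl (fun d label =>
        label.foldl (fun d kv =>
          -- combined_meta[key] raises KeyError for a key outside the dict — those inputs are
          -- excluded by Pre_; inside Pre_ the lookup is exactly getD. str() on a str is identity.
          if d.getD kv.1 "" ≠ "" then
            d.insert kv.1 (PySem.Str.join ", " [d.getD kv.1 "", kv.2])
          else
            d.insert kv.1 kv.2) d) init
    final.items

-- ===== PORT B =====
def combine_labels_meta_alt (access_labels : List (List (String × String))) : List (String × String) :=
  if access_labels = [] then []  -- 'if not access_labels: return {}'
  else
    let values : PySem.Dict String (List String) :=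
      access_labels.foldl (fun c label =>
        label.foldl (fun c kv =>
          -- values[key].append(str(value)): KeyError for a key outside the dict (outside Pre_);
          -- inside Pre_ the key is present and modify is exactly the in-place append.
          c.modify kv.1 [] (fun vs => vs ++ [kv.2])) c)
        (((PySem.Dict.empty.insert "action" []).insert "account" []).insert "group" [])
    -- per key: combined = ""; for v in vals: combined = f"{combined}, {v}" if combined else v
    -- (the f-string is exactly string concatenation)
    values.items.map (fun p =>
      (p.1, p.2.foldl (fun a v => if a ≠ "" then a ++ ", " ++ v else v) ""))

-- ===== PRECONDITION & SPEC =====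
-- Pre_ excludes exactly the labels carrying a key other than "action"/"account"/"group",
-- on which both Pythons raise KeyError.
def Pre_combine_labels_meta (access_labels : List (List (String × String))) : Prop :=
  ∀ label ∈ access_labels, ∀ kv ∈ label,
    kv.1 = "action" ∨ kv.1 = "account" ∨ kv.1 = "group"
instance (access_labels : List (List (String × String))) : Decidable (Pre_combine_labels_meta access_labels) := by unfold Pre_combine_labels_meta; infer_instance

def pvWitness_combine_labels_meta : (List (List (String × String))) :=
  [[("action", "x"), ("group", "")], [("action", "y"), ("account", "z")]]

def Spec_combine_labels_meta (access_labels : List (List (String × String))) (out : List (String × String)) : Prop := out = combine_labels_meta_alt access_labels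
instance (access_labels : List (List (String × String))) (out : List (String × String)) : Decidable (Spec_combine_labels_meta access_labels out) := by unfold Spec_combine_labels_meta; infer_instance

-- ===== CLAIM =====
def Claim_equal_combine_labels_meta : Prop := ∀ (access_labels : List (List (String × String))), Dom_combine_labels_meta access_labels → Pre_combine_labels_meta access_labels → Spec_combine_labels_meta access_labels (combine_labels_meta access_labels)

-- ===== LEMMAS AND PROOFS =====

-- A's per-item accumulator update, as a function of the old accumulated string and the new value.
def pvAccStep (a v : String) : String :=
  if a ≠ "" then PySem.Str.join ", " [a, v] else v

lemma pvStepA_eq :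
    (fun (d : PySem.Dict String String) (kv : String × String) =>
      if d.getD kv.1 "" ≠ "" then
        d.insert kv.1 (PySem.Str.join ", " [d.getD kv.1 "", kv.2])
      else
        d.insert kv.1 kv.2)
    = (fun d kv => d.insert kv.1 (pvAccStep (d.getD kv.1 "") kv.2)) := by
  funext d kv
  simp only [pvAccStep]
  split <;> rfl

lemma pvJoin_pair_toList (sep a v : String) :
    (PySem.Str.join sep [a, v]).toList = a.toList ++ sep.toList ++ v.toList := by
  simp [PySem.Str.toList_join, PySem.Chars.join, List.intercalate]

-- B's incremental step is the same accumulator update as A's.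
lemma pvStepB_eq :
    (fun (a v : String) => if a ≠ "" then a ++ ", " ++ v else v) = pvAccStep := by
  funext a v
  simp only [pvAccStep]
  split
  · apply String.toList_inj.mp
    rw [pvJoin_pair_toList]
    simp
  · rfl

-- A's accumulated string for key k, after processing the flattened item list.
lemma pvA_getD (l : List (String × String)) : ∀ (d : PySem.Dict String String) (k : String),
    (l.foldl (fun d kv => d.insert kv.1 (pvAccStep (d.getD kv.1 "") kv.2)) d).getD k ""
    = ((l.filter (fun p => p.1 == k)).map (·.2)).foldl pvAccStep (d.getD k "") := by
  induction l with
  | nil => intro d k; rfl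
  | cons kv t ih =>
    intro d k
    simp only [List.foldl_cons, ih, List.filter_cons]
    by_cases hk : kv.1 = k
    · simp [hk]
    · have hbe : (kv.1 == k) = false := by simpa using hk
      simp only [hbe, Bool.false_eq_true, if_false, PySem.Dict.getD_insert,
        if_neg (fun hh => hk (Eq.symm hh))]

lemma pvSet_update_self (xs : List String) : ∀ (s : PySem.Set String),
    (∀ x ∈ xs, x ∈ s) → PySem.Set.update s xs = s := by
  induction xs with
  | nil => intro s _; rfl
  | cons x t ih =>
    intro s h
    have hx : PySem.Set.add s x = s := by
      simp [PySem.Set.add, PySem.Set.contains, h x (by simp)]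
    simp only [PySem.Set.update, List.foldl_cons, hx]
    exact ih s (fun y hy => h y (by simp [hy]))

-- The main equivalence on a non-empty input.
lemma pvMain (access_labels : List (List (String × String))) (h : access_labels ≠ [])
    (hpre : Pre_combine_labels_meta access_labels) :
    combine_labels_meta access_labels = combine_labels_meta_alt access_labels := by
  have hkeys : ∀ x ∈ access_labels.flatten.map (·.1),
      x ∈ (["action", "account", "group"] : List String) := by
    intro x hx
    simp only [List.mem_map, List.mem_flatten] at hx
    obtain ⟨kv, ⟨label, hl, hkv⟩, rfl⟩ := hx
    rcases hpre label hl kv hkv with h1 | h1 | h1 <;> simp [h1]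
  simp only [combine_labels_meta, combine_labels_meta_alt, if_neg h, pvStepA_eq, pvStepB_eq,
    ← List.foldl_flatten]
  set l := access_labels.flatten with hl
  -- keys of both final dicts are exactly ["action", "account", "group"]
  have hAkeys :
      (l.foldl (fun d kv => d.insert kv.1 (pvAccStep (d.getD kv.1 "") kv.2))
        (((PySem.Dict.empty.insert "action" "").insert "account" "").insert "group" "")).keys
      = ["action", "account", "group"] := by
    rw [PySem.Dict.keys_foldl_insert_key l (fun kv => kv.1)
      (fun d kv => pvAccStep (d.getD kv.1 "") kv.2)]
    exact pvSet_update_self _ _ hkeys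
  have hBkeys :
      (l.foldl (fun c kv => c.modify kv.1 [] (fun vs => vs ++ [kv.2]))
        (((PySem.Dict.empty.insert "action" []).insert "account" []).insert "group" [])).keys
      = ["action", "account", "group"] := by
    rw [PySem.Dict.keys_foldl_modify_key l (fun kv => kv.1) []
      (fun d kv vs => vs ++ [kv.2])]
    exact pvSet_update_self _ _ hkeys
  rw [PySem.Dict.items_eq_map_keys _ (by rw [hAkeys]; decide) "", hAkeys]
  rw [PySem.Dict.items_eq_map_keys _ (by rw [hBkeys]; decide) [], hBkeys]
  simp only [List.map_cons, List.map_nil]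
  have perkey : ∀ k : String,
      (((PySem.Dict.empty.insert "action" "").insert "account" "").insert "group" "").getD k "" = "" →
      (((PySem.Dict.empty.insert "action" []).insert "account" []).insert "group" []).getD k
        ([] : List String) = [] →
      (l.foldl (fun d kv => d.insert kv.1 (pvAccStep (d.getD kv.1 "") kv.2))
        (((PySem.Dict.empty.insert "action" "").insert "account" "").insert "group" "")).getD k ""
      = ((l.foldl (fun c kv => c.modify kv.1 [] (fun vs => vs ++ [kv.2]))
            (((PySem.Dict.empty.insert "action" []).insert "account" []).insert "group" [])).getD k
          []).foldl pvAccStep "" := by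
    intro k hA0 hB0
    rw [pvA_getD, hA0, PySem.Dict.getD_foldl_modify_append, hB0]
    simp only [List.nil_append]
  rw [perkey "action" (by decide) (by decide), perkey "account" (by decide) (by decide),
    perkey "group" (by decide) (by decide)]

-- ===== VERDICT =====
theorem combine_labels_meta_spec : Claim_equal_combine_labels_meta := by
  intro access_labels _hdom hpre
  unfold Spec_combine_labels_meta
  by_cases h : access_labels = []
  · subst h; rfl
  · exact pvMain access_labels h hpre
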